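-- pv_equiv track=rewrite | github.com/BOUALILILila/hybridseq2seq | hybridseq2seq/data/parsers/semantic_parser.py | map_char_to_token_pos
-- ===== SOURCE A (Python) =====
-- def map_char_to_token_pos(sent: str):
--     char_to_token_map = []
--     token_pos = 0
--     for char in sent:
--         if char != " ":
--             if len(char_to_token_map) > 0 and char_to_token_map[-1] == -1:
--                 token_pos += 1
--             char_to_token_map.append(token_pos)
--         else:
--             char_to_token_map.append(-1)
--     return char_to_token_map
-- ===== SOURCE B (Python) =====
-- def map_char_to_token_pos(sent):
--     # Run-based: emit -1 per space, and a constant index for each whole word run.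
--     out = []
--     k = 1 if sent.startswith(" ") else 0  # a leading space pushes the first word to index 1
--     i = 0
--     n = len(sent)
--     while i < n:
--         if sent[i] == " ":
--             out.append(-1)
--             i += 1
--         else:
--             j = i
--             while j < n and sent[j] != " ":
--                 j += 1
--             out.extend([k] * (j - i))
--             k += 1
--             i = j
--     return out
-- ===== Notes on version B (the rewrite author's own statement) =====
-- stated objective: alternative
-- what changed: B scans the sentence run by run: each maximal non-space run is emitted in one block with a precomputed word index (leading space offsets the first word to 1), instead of A's per-character loop that re-inspects the last appended element to decide when to increment the counter.
import Mathlib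
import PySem

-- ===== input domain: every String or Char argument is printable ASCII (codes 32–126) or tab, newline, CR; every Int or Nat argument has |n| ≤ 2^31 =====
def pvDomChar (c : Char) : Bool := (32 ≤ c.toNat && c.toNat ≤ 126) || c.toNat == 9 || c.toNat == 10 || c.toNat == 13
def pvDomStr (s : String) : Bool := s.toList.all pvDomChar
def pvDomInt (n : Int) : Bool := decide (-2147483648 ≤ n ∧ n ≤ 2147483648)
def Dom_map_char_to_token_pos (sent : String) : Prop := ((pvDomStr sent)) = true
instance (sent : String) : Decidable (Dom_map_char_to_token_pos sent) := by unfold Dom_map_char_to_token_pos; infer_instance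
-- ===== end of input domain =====

-- B replaces A's per-character loop (which re-inspects the last appended element) by a
-- run-by-run scan emitting each word's index in one block; alternative decomposition, same cost.


-- ===== PORT A =====
-- for char in sent: append token_pos (bumped if the last entry is -1) for non-space, -1 for space
def map_char_to_token_pos (sent : String) : List Int :=
  (sent.toList.foldl
    (fun (st : List Int × Int) (c : Char) =>
      if c ≠ ' ' then
        let tp := if 0 < st.1.length ∧ PySem.List.pyGet? st.1 (-1) = some (-1) then st.2 + 1 else st.2
        (st.1 ++ [tp], tp)
      else
        (st.1 ++ [-1], st.2))
    ([], 0)).1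

-- ===== PORT B =====
-- the outer while-loop of Source B: a space appends -1; a non-space starts a run (inner while =
-- takeWhile) emitted as one block of the current word index k; the loop resumes after the run
def pvBLoop (out : List Int) (chars : List Char) (k : Int) : List Int :=
  match chars with
  | [] => out
  | c :: rest =>
    if c = ' ' then
      pvBLoop (out ++ [-1]) rest k
    else
      pvBLoop (out ++ (c :: rest.takeWhile (· ≠ ' ')).map (fun _ => k))
        (rest.dropWhile (· ≠ ' ')) (k + 1)
  termination_by chars.length
  decreasing_by
    all_goals simp
    exact List.length_dropWhile_le _ _

def map_char_to_token_pos_alt (sent : String) : List Int :=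
  let k : Int := if PySem.Str.startswith sent " " then 1 else 0
  pvBLoop [] sent.toList k

-- ===== PRECONDITION & SPEC =====
def Spec_map_char_to_token_pos (sent : String) (out : List Int) : Prop := out = map_char_to_token_pos_alt sent
instance (sent : String) (out : List Int) : Decidable (Spec_map_char_to_token_pos sent out) := by unfold Spec_map_char_to_token_pos; infer_instance

-- ===== CLAIM (what is proved, stated in full; the proofs are below) =====
def Claim_equal_map_char_to_token_pos : Prop := ∀ (sent : String), Dom_map_char_to_token_pos sent → Spec_map_char_to_token_pos sent (map_char_to_token_pos sent)

-- ===== LEMMAS AND PROOFS =====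

-- reference function: one char at a time, state = (current token index, was the previous char a space)
def pvG : List Char → Int → Bool → List Int
  | [], _, _ => []
  | c :: rest, tp, ls =>
    if c = ' ' then (-1) :: pvG rest tp true
    else
      let tp' := if ls then tp + 1 else tp
      tp' :: pvG rest tp' false

-- accumulator-free version of B's loop
def pvB : List Char → Int → List Int
  | [], _ => []
  | c :: rest, k =>
    if c = ' ' then (-1) :: pvB rest k
    else (c :: rest.takeWhile (· ≠ ' ')).map (fun _ => k) ++ pvB (rest.dropWhile (· ≠ ' ')) (k + 1)
  termination_by chars _ => chars.length
  decreasing_by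
    all_goals simp
    exact List.length_dropWhile_le _ _

theorem pvG_spaces (rest : List Char) (tp : Int) (s : Bool) :
    pvG (' ' :: rest) tp s = (-1) :: pvG rest tp true := by
  simp [pvG]

theorem pvG_nil (tp : Int) (s : Bool) : pvG [] tp s = [] := by
  simp [pvG]

theorem pvG_nonspace (c : Char) (rest : List Char) (tp : Int) (s : Bool) (hc : c ≠ ' ') :
    pvG (c :: rest) tp s = (if s then tp + 1 else tp) :: pvG rest (if s then tp + 1 else tp) false := by
  simp [pvG, hc]

theorem pvBLoop_nil (out : List Int) (k : Int) : pvBLoop out [] k = out := by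
  rw [pvBLoop.eq_def]

theorem pvBLoop_cons_space (out : List Int) (rest : List Char) (k : Int) :
    pvBLoop out (' ' :: rest) k = pvBLoop (out ++ [-1]) rest k := by
  rw [pvBLoop.eq_def]; simp

theorem pvBLoop_cons_nonspace (out : List Int) (c : Char) (rest : List Char) (k : Int)
    (hc : c ≠ ' ') :
    pvBLoop out (c :: rest) k =
      pvBLoop (out ++ (c :: rest.takeWhile (· ≠ ' ')).map (fun _ => k))
        (rest.dropWhile (· ≠ ' ')) (k + 1) := by
  rw [pvBLoop.eq_def]; simp [hc]

theorem pvB_nil (k : Int) : pvB [] k = [] := by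
  rw [pvB.eq_def]

theorem pvB_cons_space (rest : List Char) (k : Int) :
    pvB (' ' :: rest) k = (-1) :: pvB rest k := by
  rw [pvB.eq_def]; simp

theorem pvB_cons_nonspace (c : Char) (rest : List Char) (k : Int) (hc : c ≠ ' ') :
    pvB (c :: rest) k =
      (c :: rest.takeWhile (· ≠ ' ')).map (fun _ => k) ++ pvB (rest.dropWhile (· ≠ ' ')) (k + 1) := by
  rw [pvB.eq_def]; simp [hc]

def pvLastNeg (acc : List Int) : Bool := acc.getLast? == some (-1)

def pvStepA (st : List Int × Int) (c : Char) : List Int × Int :=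
  if c ≠ ' ' then
    let tp := if 0 < st.1.length ∧ PySem.List.pyGet? st.1 (-1) = some (-1) then st.2 + 1 else st.2
    (st.1 ++ [tp], tp)
  else
    (st.1 ++ [-1], st.2)

theorem pvStepA_space (acc : List Int) (tp : Int) : pvStepA (acc, tp) ' ' = (acc ++ [-1], tp) := by
  simp [pvStepA]

theorem pvStepA_nonspace (acc : List Int) (tp : Int) (c : Char) (hc : c ≠ ' ') :
    pvStepA (acc, tp) c =
      ((acc ++ [if pvLastNeg acc then tp + 1 else tp]), if pvLastNeg acc then tp + 1 else tp) := by
  have hcond : (0 < acc.length ∧ PySem.List.pyGet? acc (-1) = some (-1)) ↔ pvLastNeg acc = true := by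
    rw [PySem.List.pyGet?_neg_one]
    cases acc with
    | nil => simp [pvLastNeg]
    | cons a as => simp [pvLastNeg]
  simp only [pvStepA, if_pos hc]
  by_cases h : pvLastNeg acc = true
  · rw [if_pos (hcond.mpr h), h]; simp
  · simp only [Bool.not_eq_true] at h
    rw [if_neg (fun hh => by simp [hcond.mp hh] at h), h]
    simp

theorem pvFoldA : ∀ (chars : List Char) (acc : List Int) (tp : Int), 0 ≤ tp →
    (chars.foldl pvStepA (acc, tp)).1 = acc ++ pvG chars tp (pvLastNeg acc) := by
  intro chars
  induction chars with
  | nil => intro acc tp _; simp [pvG]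
  | cons c rest ih =>
    intro acc tp htp
    by_cases hc : c = ' '
    · subst hc
      rw [List.foldl_cons, pvStepA_space, ih (acc ++ [-1]) tp htp]
      have hln : pvLastNeg (acc ++ [-1]) = true := by simp [pvLastNeg]
      rw [hln, pvG_spaces]
      simp
    · rw [List.foldl_cons, pvStepA_nonspace acc tp c hc]
      set tp' : Int := if pvLastNeg acc then tp + 1 else tp with htp'
      have htp'nn : 0 ≤ tp' := by rw [htp']; split <;> omega
      rw [ih (acc ++ [tp']) tp' htp'nn]
      have hln : pvLastNeg (acc ++ [tp']) = false := by
        simp [pvLastNeg]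
        rw [htp']; split <;> omega
      rw [hln]
      have hg : pvG (c :: rest) tp (pvLastNeg acc) = tp' :: pvG rest tp' false := by
        simp only [pvG, if_neg hc, htp']
      rw [hg]
      simp

theorem pvBLoop_acc : ∀ (n : ℕ) (chars : List Char), chars.length ≤ n →
    ∀ (out : List Int) (k : Int), pvBLoop out chars k = out ++ pvB chars k := by
  intro n
  induction n with
  | zero =>
    intro chars h out k
    have : chars = [] := List.length_eq_zero_iff.mp (Nat.le_zero.mp h)
    subst this
    rw [pvBLoop_nil, pvB_nil]
    simp
  | succ m ih =>
    intro chars h out k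
    match chars with
    | [] => rw [pvBLoop_nil, pvB_nil]; simp
    | c :: rest =>
      have hrest : rest.length ≤ m := by simpa using Nat.lt_succ_iff.mp h
      by_cases hc : c = ' '
      · subst hc
        rw [pvBLoop_cons_space, pvB_cons_space, ih rest hrest (out ++ [-1]) k]
        simp
      · have hlen : (rest.dropWhile (· ≠ ' ')).length ≤ m :=
          le_trans (List.length_dropWhile_le _ _) hrest
        rw [pvBLoop_cons_nonspace out c rest k hc, pvB_cons_nonspace c rest k hc, ih _ hlen]
        simp

-- simultaneous induction: B's run-based loop agrees with the one-char-at-a-time reference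
theorem pvB_G : ∀ (n : ℕ) (chars : List Char), chars.length ≤ n → ∀ (tp : Int),
    (pvB chars (tp + 1) = pvG chars tp true ∧
     pvG chars tp false =
       (chars.takeWhile (· ≠ ' ')).map (fun _ => tp) ++ pvB (chars.dropWhile (· ≠ ' ')) (tp + 1)) := by
  intro n
  induction n with
  | zero =>
    intro chars h tp
    have : chars = [] := List.length_eq_zero_iff.mp (Nat.le_zero.mp h)
    subst this
    refine ⟨?_, ?_⟩ <;> simp [pvG_nil, pvB_nil]
  | succ m ih =>
    intro chars h tp
    match chars with
    | [] =>
      refine ⟨?_, ?_⟩ <;> simp [pvG_nil, pvB_nil]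
    | c :: rest =>
      have hrest : rest.length ≤ m := by simpa using Nat.lt_succ_iff.mp h
      by_cases hc : c = ' '
      · subst hc
        constructor
        · rw [pvB_cons_space, pvG_spaces, (ih rest hrest tp).1]
        · rw [pvG_spaces]
          have ht : List.takeWhile (· ≠ ' ') (' ' :: rest) = ([] : List Char) := by
            simp [List.takeWhile]
          have hd : List.dropWhile (· ≠ ' ') (' ' :: rest) = ' ' :: rest := by
            simp [List.dropWhile]
          rw [ht, hd, pvB_cons_space, (ih rest hrest tp).1]
          simp
      · have ht : List.takeWhile (· ≠ ' ') (c :: rest) = c :: rest.takeWhile (· ≠ ' ') := by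
          simp [List.takeWhile, hc]
        have hd : List.dropWhile (· ≠ ' ') (c :: rest) = rest.dropWhile (· ≠ ' ') := by
          simp [List.dropWhile, hc]
        constructor
        · rw [pvB_cons_nonspace c rest (tp + 1) hc]
          rw [pvG_nonspace c rest tp true hc]
          simp only [if_pos trivial]
          rw [(ih rest hrest (tp + 1)).2]
          simp
        · rw [pvG_nonspace c rest tp false hc]
          simp only [Bool.false_eq_true, if_false]
          rw [ht, hd, (ih rest hrest tp).2]
          simp

-- ===== VERDICT (by name: the statement is the Claim_ definition above) =====
theorem map_char_to_token_pos_spec : Claim_equal_map_char_to_token_pos := by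
  intro sent _
  unfold Spec_map_char_to_token_pos map_char_to_token_pos_alt
  have hA : map_char_to_token_pos sent = (sent.toList.foldl pvStepA ([], 0)).1 := rfl
  rw [hA, pvFoldA sent.toList [] 0 le_rfl]
  have hln : pvLastNeg [] = false := by simp [pvLastNeg]
  rw [hln]
  simp only [List.nil_append]
  rw [pvBLoop_acc sent.toList.length sent.toList le_rfl]
  simp only [List.nil_append]
  have hstart : PySem.Str.startswith sent " " = (sent.toList.head? == some ' ') := by
    have h1 : PySem.Str.startswith sent " " = PySem.Chars.startswith sent.toList [' '] := by
      simp [PySem.Str.startswith]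
    rw [h1]
    cases sent.toList with
    | nil => simp [PySem.Chars.startswith]
    | cons c cs =>
      by_cases hc : c = ' '
      · subst hc; simp [PySem.Chars.startswith]
      · simp [PySem.Chars.startswith, List.isPrefixOf, hc, Ne.symm hc]
  rw [hstart]
  cases hl : sent.toList with
  | nil => rw [pvG_nil, pvB_nil]
  | cons c cs =>
    by_cases hc : c = ' '
    · subst hc
      simp only [List.head?_cons, beq_self_eq_true, if_pos]
      rw [pvG_spaces]
      show pvG (' ' :: cs) 0 false = pvB (' ' :: cs) (0 + 1)
      rw [pvG_spaces, pvB_cons_space, (pvB_G cs.length cs le_rfl 0).1]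
    · have hh : ((c :: cs).head? == some ' ') = false := by simp [hc]
      rw [hh]
      simp only [Bool.false_eq_true, if_false]
      rw [pvG_nonspace c cs 0 false hc]
      simp only [Bool.false_eq_true, if_false]
      rw [pvB_cons_nonspace c cs 0 hc, (pvB_G cs.length cs le_rfl 0).2]
      simp
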